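-- pv_equiv track=rewrite | github.com/sarishtshreshth0/plag_extract | Project_CodeNet_Python800/p03137/s854549440.py | solve
-- ===== SOURCE A (Python) =====
-- def solve(n,m,x):
--   if n >= m:
--     return 0
--   else:
--     d = list(sorted(x[i+1] - x[i] for i in range(m-1)))[::-1]
--     res = x[-1] - x[0]
--     for i in range(min(m-1,n-1)):
--         res -= d[i]
--     return res
-- ===== SOURCE B (Python) =====
-- def sum_smallest(g, k):
--     # sum of the k smallest elements of g, by recursive three-way partition (no sorting)
--     if k <= 0:
--         return 0
--     if k >= len(g):
--         return sum(g)
--     p = g[len(g) // 2]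
--     lo = [v for v in g if v < p]
--     eq = [v for v in g if v == p]
--     hi = [v for v in g if v > p]
--     if k <= len(lo):
--         return sum_smallest(lo, k)
--     if k <= len(lo) + len(eq):
--         return sum(lo) + p * (k - len(lo))
--     return sum(lo) + sum(eq) + sum_smallest(hi, k - len(lo) - len(eq))
--
-- def solve(n, m, x):
--     # removing the n-1 largest gaps = removing all gaps, then adding back the m-n smallest
--     if n >= m:
--         return 0
--     gaps = [x[i + 1] - x[i] for i in range(m - 1)]
--     k = (m - 1) - max(n - 1, 0)
--     return x[-1] - x[0] - sum(gaps) + sum_smallest(gaps, k)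
-- ===== Notes on version B (the rewrite author's own statement) =====
-- stated objective: alternative
-- what changed: B never sorts: it rewrites the answer as span minus all gaps plus the sum of the m-n smallest gaps, and computes that sum by a recursive three-way quickselect-style partition around a pivot.
import Mathlib
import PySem

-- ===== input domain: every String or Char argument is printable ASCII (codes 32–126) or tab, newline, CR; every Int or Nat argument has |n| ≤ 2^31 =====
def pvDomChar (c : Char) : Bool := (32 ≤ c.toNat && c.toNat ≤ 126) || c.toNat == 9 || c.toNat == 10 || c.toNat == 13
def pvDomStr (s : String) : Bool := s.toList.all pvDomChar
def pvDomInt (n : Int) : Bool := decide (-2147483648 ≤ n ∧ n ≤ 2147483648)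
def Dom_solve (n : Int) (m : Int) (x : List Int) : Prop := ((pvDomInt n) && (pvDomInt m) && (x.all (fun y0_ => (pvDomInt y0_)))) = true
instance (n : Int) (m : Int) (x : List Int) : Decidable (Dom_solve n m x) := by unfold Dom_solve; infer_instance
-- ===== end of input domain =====

-- B avoids sorting entirely: answer = span - sum(all gaps) + sum of the m-n smallest gaps,
-- the latter computed by a recursive three-way partition around a pivot (objective: alternative).

-- ===== PORT A =====
-- d = sorted(gaps)[::-1]; res = x[-1]-x[0]; loop subtracts d[i] for i in range(min(m-1,n-1))
def solve (n : Int) (m : Int) (x : List Int) : Int :=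
  if n ≥ m then 0
  else
    let d := (PySem.List.sorted
        ((PySem.List.pyRange 0 (m-1) 1).map
          (fun i => PySem.List.pyGetD x (i+1) 0 - PySem.List.pyGetD x i 0))
        (fun v => v) false).reverse  -- [::-1], cf. PySem.List.slice?_none_none_neg_one
    let res := PySem.List.pyGetD x (-1) 0 - PySem.List.pyGetD x 0 0
    (PySem.List.pyRange 0 (min (m-1) (n-1)) 1).foldl
      (fun res i => res - PySem.List.pyGetD d i 0) res

-- ===== PORT B =====
-- lemmas the port cites in its decreasing_by (needed for termination, hence above the claim block)
lemma pivot_mem (g : List Int) (h : g ≠ []) : g.getD (g.length / 2) 0 ∈ g := by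
  have hlt : g.length / 2 < g.length :=
    Nat.div_lt_self (by cases g with | nil => exact absurd rfl h | cons a t => simp) (by omega)
  rw [List.getD_eq_getElem?_getD, List.getElem?_eq_getElem hlt]
  exact List.getElem_mem hlt

lemma filter_length_lt (g : List Int) (p : Int) (q : Int → Bool)
    (hp : p ∈ g) (hq : q p = false) : (g.filter q).length < g.length :=
  List.length_filter_lt_length_iff_exists.mpr ⟨p, hp, by simp [hq]⟩

lemma attach_filter_length_lt (g : List Int) (q : Int → Bool) (p : Int)
    (hp : p ∈ g) (hq : q p = false) :
    (List.filter (fun x : {x // x ∈ g} => q ↑x) g.attach).length < g.length := by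
  rw [← List.countP_eq_length_filter, List.countP_attach, List.countP_eq_length_filter]
  exact filter_length_lt g p q hp hq

-- sum of the k smallest elements of g, by recursive three-way partition (quickselect style)
def sumSmallest (g : List Int) (k : Int) : Int :=
  if h1 : k ≤ 0 then 0
  else if h2 : (g.length : Int) ≤ k then g.sum
  else
    let p := g.getD (g.length / 2) 0
    let lo := g.filter (fun v => decide (v < p))
    let eq := g.filter (fun v => decide (v = p))
    let hi := g.filter (fun v => decide (p < v))
    if k ≤ (lo.length : Int) then sumSmallest lo k
    else if k ≤ (lo.length : Int) + (eq.length : Int) then lo.sum + p * (k - (lo.length : Int))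
    else lo.sum + eq.sum + sumSmallest hi (k - (lo.length : Int) - (eq.length : Int))
termination_by g.length
decreasing_by
  all_goals
    have hne : g ≠ [] := by
      intro hnil
      apply h2; simp [hnil]; omega
    have hmem := pivot_mem g hne
    simp only [List.length_unattach]
    first
      | exact attach_filter_length_lt g (fun v => decide (v < g.getD (g.length / 2) 0)) _ hmem
          (by simp)
      | exact attach_filter_length_lt g (fun v => decide (g.getD (g.length / 2) 0 < v)) _ hmem
          (by simp)

-- gaps = [x[i+1]-x[i] for i in range(m-1)]; k = (m-1) - max(n-1, 0);
-- return x[-1] - x[0] - sum(gaps) + sum_smallest(gaps, k)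
def solve_alt (n : Int) (m : Int) (x : List Int) : Int :=
  if n ≥ m then 0
  else
    let gaps := (PySem.List.pyRange 0 (m-1) 1).map
      (fun i => PySem.List.pyGetD x (i+1) 0 - PySem.List.pyGetD x i 0)
    let k := (m - 1) - max (n - 1) 0
    PySem.List.pyGetD x (-1) 0 - PySem.List.pyGetD x 0 0 - gaps.sum + sumSmallest gaps k

-- ===== PRECONDITION & SPEC =====
-- Pre excludes exactly the inputs where A raises IndexError: n < m with x empty (x[-1])
-- or with m exceeding len(x) (x[i+1] inside the gap comprehension).
def Pre_solve (n : Int) (m : Int) (x : List Int) : Prop :=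
  n ≥ m ∨ (x ≠ [] ∧ m ≤ (x.length : Int))
instance (n : Int) (m : Int) (x : List Int) : Decidable (Pre_solve n m x) := by
  unfold Pre_solve; infer_instance
def pvWitness_solve : Int × Int × List Int := (2, 4, [1, 3, 10, 14])

def Spec_solve (n : Int) (m : Int) (x : List Int) (out : Int) : Prop := out = solve_alt n m x
instance (n : Int) (m : Int) (x : List Int) (out : Int) : Decidable (Spec_solve n m x out) := by unfold Spec_solve; infer_instance

-- ===== CLAIM (what is proved, stated in full; the proofs are below) =====
def Claim_equal_solve : Prop := ∀ (n : Int) (m : Int) (x : List Int), Dom_solve n m x → Pre_solve n m x → Spec_solve n m x (solve n m x)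

-- ===== LEMMAS AND PROOFS =====

-- Subtracting d[0], …, d[k-1] in a loop is subtracting the sum of the first k elements.
lemma foldl_sub_take_nat (d : List Int) (t : Nat) (r : Int) :
    (List.range t).foldl (fun r (i : Nat) => r - PySem.List.pyGetD d (i : Int) 0) r
      = r - (d.take t).sum := by
  induction t generalizing r with
  | zero => simp
  | succ t ih =>
    rw [List.range_succ, List.foldl_append, ih]
    simp only [List.foldl_cons, List.foldl_nil, List.take_add_one, List.sum_append]
    rw [PySem.List.pyGetD_natCast]
    cases h : d[t]? with
    | none => simp [List.getD, h]
    | some v => simp [List.getD, h]; ring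

lemma foldl_sub_take (d : List Int) (k : Int) (r : Int) :
    (PySem.List.pyRange 0 k 1).foldl (fun r i => r - PySem.List.pyGetD d i 0) r
      = r - (d.take k.toNat).sum := by
  rw [PySem.List.pyRange_one, List.foldl_map]
  simp only [zero_add, Int.sub_zero]
  exact foldl_sub_take_nat d k.toNat r

-- The top-t sum of a list read backwards is total minus the bottom-(len−t) sum.
lemma rev_take_sum (s : List Int) (t : Nat) :
    (s.reverse.take t).sum = s.sum - (s.take (s.length - t)).sum := by
  have h1 : (s.reverse.take t).sum + (s.reverse.drop t).sum = s.reverse.sum := by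
    rw [← List.sum_append, List.take_append_drop]
  have h2 : s.reverse.drop t = (s.take (s.length - t)).reverse := List.drop_reverse ..
  rw [h2, List.sum_reverse, List.sum_reverse] at h1
  omega

lemma pairwise_const (p : Int) (l : List Int) (h : ∀ a ∈ l, a = p) :
    l.Pairwise (fun a b => a ≤ b) := by
  induction l with
  | nil => simp
  | cons a t ih =>
    refine List.Pairwise.cons ?_ (ih (fun b hb => h b (List.mem_cons_of_mem a hb)))
    intro b hb
    rw [h a List.mem_cons_self, h b (List.mem_cons_of_mem a hb)]

lemma sum_take_const (p : Int) (l : List Int) (h : ∀ a ∈ l, a = p) (j : Nat) :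
    (l.take j).sum = p * min j l.length := by
  induction l generalizing j with
  | nil => simp
  | cons a t ih =>
    cases j with
    | zero => simp
    | succ j =>
      have ha : a = p := h a List.mem_cons_self
      rw [List.take_succ_cons, List.sum_cons, ih (fun b hb => h b (List.mem_cons_of_mem a hb)) j,
        ha, List.length_cons, Nat.succ_min_succ]
      push_cast
      ring

lemma count_filter_neg (a : Int) (l : List Int) (q : Int → Bool) (h : q a = false) :
    (l.filter q).count a = 0 :=
  List.count_eq_zero.mpr (fun hm => by have := List.mem_filter.mp hm; simp [h] at this)

-- sorted(g) is sorted(lo) ++ eq ++ sorted(hi) for the three-way partition at any pivot p.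
lemma split_sorted (g : List Int) (p : Int) :
    PySem.List.sorted g (fun v => v) false =
      PySem.List.sorted (g.filter (fun v => decide (v < p))) (fun v => v) false
        ++ g.filter (fun v => decide (v = p))
        ++ PySem.List.sorted (g.filter (fun v => decide (p < v))) (fun v => v) false := by
  apply PySem.List.sorted_id_eq_of_perm_of_pairwise
  · -- permutation: each sorted block permutes its filter, and the filters partition g
    refine List.Perm.trans (List.Perm.append (List.Perm.append (PySem.List.sorted_perm ..)
      (List.Perm.refl _)) (PySem.List.sorted_perm ..)) ?_
    rw [List.perm_iff_count]
    intro a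
    rw [List.count_append, List.count_append]
    rcases lt_trichotomy a p with h | h | h
    · rw [List.count_filter (p := fun v => decide (v < p)) (by simp [h]),
        count_filter_neg a g (fun v => decide (v = p)) (by simp; omega),
        count_filter_neg a g (fun v => decide (p < v)) (by simp; omega)]
      omega
    · rw [List.count_filter (p := fun v => decide (v = p)) (by simp [h]),
        count_filter_neg a g (fun v => decide (v < p)) (by simp; omega),
        count_filter_neg a g (fun v => decide (p < v)) (by simp; omega)]
      omega
    · rw [List.count_filter (p := fun v => decide (p < v)) (by simp [h]),
        count_filter_neg a g (fun v => decide (v < p)) (by simp; omega),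
        count_filter_neg a g (fun v => decide (v = p)) (by simp; omega)]
      omega
  · -- sortedness: within each block, and across the block boundaries
    rw [List.pairwise_append, List.pairwise_append]
    refine ⟨⟨PySem.List.sorted_pairwise _ _, ?_, ?_⟩, PySem.List.sorted_pairwise _ _, ?_⟩
    · exact pairwise_const p _ (fun a ha => by simpa using (List.mem_filter.mp ha).2)
    · intro a ha b hb
      have ha' : a < p := by
        have := (List.mem_filter.mp ((PySem.List.mem_sorted ..).mp ha)).2
        simpa using this
      have hb' : b = p := by simpa using (List.mem_filter.mp hb).2
      omega
    · intro a ha b hb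
      have hb' : p < b := by
        have := (List.mem_filter.mp ((PySem.List.mem_sorted ..).mp hb)).2
        simpa using this
      rcases List.mem_append.mp ha with ha | ha
      · have ha' : a < p := by
          have := (List.mem_filter.mp ((PySem.List.mem_sorted ..).mp ha)).2
          simpa using this
        omega
      · have ha' : a = p := by simpa using (List.mem_filter.mp ha).2
        omega

-- the quickselect-style partition sum computes the sum of the k smallest elements
lemma sumSmallest_eq_take (L : Nat) : ∀ (g : List Int), g.length ≤ L → ∀ (k : Int),
    sumSmallest g k = ((PySem.List.sorted g (fun v => v) false).take k.toNat).sum := by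
  induction L with
  | zero =>
    intro g hg k
    have hnil : g = [] := List.length_eq_zero_iff.mp (Nat.le_zero.mp hg)
    subst hnil
    rw [sumSmallest]
    split_ifs with h1 h2
    · simp [PySem.List.sorted]
    · simp [PySem.List.sorted]
    · simp only [List.length_nil, Nat.cast_zero] at h2
      omega
  | succ L ih =>
    intro g hg k
    rw [sumSmallest]
    split_ifs with h1 h2
    · have : k.toNat = 0 := by omega
      simp [this]
    · have hlen : (PySem.List.sorted g (fun v => v) false).length = g.length :=
        (PySem.List.sorted_perm ..).length_eq
      rw [List.take_of_length_le (by omega), (PySem.List.sorted_perm ..).sum_eq]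
    · dsimp only
      set p := g.getD (g.length / 2) 0 with hp
      set lo := g.filter (fun v => decide (v < p)) with hlo
      set eq := g.filter (fun v => decide (v = p)) with heq
      set hi := g.filter (fun v => decide (p < v)) with hhi
      have hne : g ≠ [] := by intro hnil; apply h2; simp [hnil]; omega
      have hmem : p ∈ g := pivot_mem g hne
      have hlolt : lo.length < g.length := filter_length_lt g p _ hmem (by simp)
      have hhilt : hi.length < g.length := filter_length_lt g p _ hmem (by simp)
      have hslo : (PySem.List.sorted lo (fun v => v) false).length = lo.length :=
        (PySem.List.sorted_perm ..).length_eq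
      have hsloeq : ((PySem.List.sorted lo (fun v => v) false) ++ eq).length
          = lo.length + eq.length := by
        rw [List.length_append, hslo]
      have heqp : ∀ a ∈ eq, a = p := fun a ha => by simpa using (List.mem_filter.mp ha).2
      rw [split_sorted g p, ← hlo, ← heq, ← hhi, List.take_append, List.take_append]
      split_ifs with h3 h4
      · -- k ≤ len(lo): only the lo block contributes
        have z1 : k.toNat - (PySem.List.sorted lo (fun v => v) false).length = 0 := by omega
        have z2 : k.toNat - ((PySem.List.sorted lo (fun v => v) false) ++ eq).length = 0 := by
          omega
        rw [z1, z2, List.take_zero, List.take_zero, List.append_nil, List.append_nil,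
          ih lo (by omega) k]
      · -- len(lo) < k ≤ len(lo)+len(eq): all of lo plus (k - len(lo)) copies of p
        have z2 : k.toNat - ((PySem.List.sorted lo (fun v => v) false) ++ eq).length = 0 := by
          omega
        rw [z2, List.take_zero, List.append_nil,
          List.take_of_length_le (by omega : (PySem.List.sorted lo (fun v => v) false).length ≤ k.toNat),
          List.sum_append, sum_take_const p eq heqp, (PySem.List.sorted_perm ..).sum_eq]
        have hmin : min (k.toNat - (PySem.List.sorted lo (fun v => v) false).length) eq.length
            = k.toNat - lo.length := by omega
        rw [hmin]
        have hcast : ((k.toNat - lo.length : Nat) : Int) = k - (lo.length : Int) := by omega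
        rw [hcast]
      · -- k > len(lo)+len(eq): all of lo and eq plus a recursive call on hi
        rw [List.take_of_length_le (by omega : (PySem.List.sorted lo (fun v => v) false).length ≤ k.toNat),
          List.take_of_length_le (by omega : eq.length ≤ k.toNat - (PySem.List.sorted lo (fun v => v) false).length),
          List.sum_append, List.sum_append, (PySem.List.sorted_perm ..).sum_eq,
          ih hi (by omega) (k - (lo.length : Int) - (eq.length : Int))]
        have hidx : (k - (lo.length : Int) - (eq.length : Int)).toNat
            = k.toNat - ((PySem.List.sorted lo (fun v => v) false) ++ eq).length := by omega
        rw [hidx]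

-- ===== VERDICT (by name: the statement is the Claim_ definition above) =====
theorem solve_spec : Claim_equal_solve := by
  intro n m x _ hpre
  unfold Spec_solve solve solve_alt
  by_cases hnm : n ≥ m
  · simp [hnm]
  · simp only [if_neg hnm]
    rcases hpre with h | ⟨hx, hm⟩
    · omega
    · set gaps := (PySem.List.pyRange 0 (m-1) 1).map
        (fun i => PySem.List.pyGetD x (i+1) 0 - PySem.List.pyGetD x i 0) with hgaps
      have hmin : min (m-1) (n-1) = n - 1 := by omega
      rw [hmin, foldl_sub_take, rev_take_sum,
        (PySem.List.sorted_perm ..).sum_eq,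
        sumSmallest_eq_take gaps.length gaps le_rfl ((m - 1) - max (n - 1) 0)]
      have hlen : (PySem.List.sorted gaps (fun v => v) false).length = gaps.length :=
        (PySem.List.sorted_perm ..).length_eq
      have hglen : gaps.length = (m - 1).toNat := by
        rw [hgaps, List.length_map, PySem.List.length_pyRange_one]
        omega
      have hidx : (PySem.List.sorted gaps (fun v => v) false).length - (n-1).toNat
          = ((m - 1) - max (n - 1) 0).toNat := by
        rw [hlen, hglen]; omega
      rw [hidx]
      ring
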